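-- pv_equiv track=rewrite | github.com/yeahBOYYYYY/PyLyX | helper.py | is_table
-- ===== SOURCE A (Python) =====
-- def is_table(table):
--     if (type(table) is not list) or (not table):
--         return False
--     length = len(table)
--     width = len(table[0])
--     for row in range(length):
--         if len(table[row]) != width:
--             return False
--         for col in range(width):
--             if type(table[row][col]) is not str:
--                 return False
--     return True
-- ===== SOURCE B (Python) =====
-- def is_table(table):
--     if type(table) is not list or not table:
--         return False
--     if len({len(row) for row in table}) != 1:
--         return False
--     return all(type(c) is str for row in table for c in row)
-- ===== Notes on version B (the rewrite author's own statement) =====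
-- stated objective: simpler
-- what changed: Replaces A's single interleaved row loop (comparing each row to table[0]'s width and scanning width cells per row) with two separate whole-table passes: a set of row lengths as the rectangularity witness, then one flattened all() over every cell.
import Mathlib
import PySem

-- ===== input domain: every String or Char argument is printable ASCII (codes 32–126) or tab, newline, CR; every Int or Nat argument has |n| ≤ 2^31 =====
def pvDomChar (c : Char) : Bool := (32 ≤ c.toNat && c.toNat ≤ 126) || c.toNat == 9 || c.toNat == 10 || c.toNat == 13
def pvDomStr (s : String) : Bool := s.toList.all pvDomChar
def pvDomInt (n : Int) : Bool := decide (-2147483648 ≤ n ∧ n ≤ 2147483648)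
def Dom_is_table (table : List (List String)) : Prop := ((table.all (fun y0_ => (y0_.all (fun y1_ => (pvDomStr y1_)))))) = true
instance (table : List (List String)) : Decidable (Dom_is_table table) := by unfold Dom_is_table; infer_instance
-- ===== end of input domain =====

-- B replaces A's interleaved row loop with two separate passes: a set of row lengths (rectangularity) then a flattened cell scan (objective: simpler).


-- ===== PORT A =====
-- A's row loop; the inner col-loop's test `type(table[row][col]) is not str` is
-- statically false under the type List (List String), so that loop never returns.
def isTableRows (width : Nat) : List (List String) → Bool
  | [] => true
  | r :: rs => if r.length ≠ width then false else isTableRows width rs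

def is_table (table : List (List String)) : Bool :=
  match table with
  | [] => false                       -- `type(table) is not list` is statically false; `not table` = emptiness
  | r0 :: _ => isTableRows r0.length table

-- ===== PORT B =====
def is_table_alt (table : List (List String)) : Bool :=
  if table.isEmpty then false
  else if (PySem.Set.ofList (table.map (fun row => row.length))).length ≠ 1 then false
  else (table.flatMap (fun row => row)).all (fun _c => true)  -- `type(c) is str` is statically true

-- ===== PRECONDITION & SPEC =====
def Spec_is_table (table : List (List String)) (out : Bool) : Prop := out = is_table_alt table
instance (table : List (List String)) (out : Bool) : Decidable (Spec_is_table table out) := by unfold Spec_is_table; infer_instance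

-- ===== CLAIM (what is proved, stated in full; the proofs are below) =====
def Claim_equal_is_table : Prop := ∀ (table : List (List String)), Dom_is_table table → Spec_is_table table (is_table table)

-- ===== LEMMAS AND PROOFS =====

-- Set.add never shrinks a set
theorem pv_foldl_add_len_mono (l : List Nat) (s : List Nat) :
    s.length ≤ (l.foldl PySem.Set.add s).length := by
  induction l generalizing s with
  | nil => simp
  | cons y l ih =>
      refine le_trans ?_ (ih (PySem.Set.add s y))
      simp [PySem.Set.add]
      split <;> simp

theorem pv_ofList_singleton_iff (l : List Nat) (x : Nat) :
    ((l.foldl PySem.Set.add [x]).length = 1) ↔ (∀ y ∈ l, y = x) := by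
  induction l with
  | nil => simp
  | cons y l ih =>
      by_cases hy : y = x
      · subst hy
        simpa [List.foldl, PySem.Set.add, PySem.Set.contains] using ih
      · have hmono := pv_foldl_add_len_mono l [x, y]
        simp only [List.foldl]
        have hadd : PySem.Set.add [x] y = [x, y] := by
          simp [PySem.Set.add, PySem.Set.contains, hy]
        rw [hadd]
        constructor
        · intro h
          have h2 := hmono
          simp only [List.length_cons, List.length_nil] at h2
          omega
        · intro h; exact absurd (h y (by simp)) hy

theorem pv_rows_all (w : Nat) (l : List (List String)) :
    isTableRows w l = l.all (fun r => r.length == w) := by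
  induction l with
  | nil => rfl
  | cons r rs ih =>
      simp only [isTableRows, List.all_cons, ih]
      by_cases h : r.length = w <;> simp [h]

-- ===== VERDICT (by name: the statement is the Claim_ definition above) =====
theorem is_table_spec : Claim_equal_is_table := by
  intro table _
  unfold Spec_is_table
  match table with
  | [] => rfl
  | r0 :: rs =>
      simp only [is_table, is_table_alt, List.isEmpty_cons, if_neg Bool.false_ne_true,
        PySem.Set.ofList_eq_foldl, List.map_cons, List.foldl_cons]
      have hhead : PySem.Set.add ([] : List Nat) r0.length = [r0.length] := by
        simp [PySem.Set.add, PySem.Set.contains]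
      simp only [hhead]
      rw [pv_rows_all]
      by_cases h : ((rs.map (fun row => row.length)).foldl PySem.Set.add [r0.length]).length = 1
      · have hall := (pv_ofList_singleton_iff _ _).mp h
        have hrs : ∀ r ∈ rs, r.length = r0.length := by
          intro r hr; exact hall r.length (by simp; exact ⟨r, hr, rfl⟩)
        simp only [h, ne_eq, not_true_eq_false, if_false]
        have hL : ((r0 :: rs).all fun r => r.length == r0.length) = true := by
          rw [List.all_eq_true]; intro r hr
          rcases List.mem_cons.mp hr with h0 | h1
          · simp [h0]
          · simpa using hrs r h1
        have hR : (List.flatMap (fun row => row) (r0 :: rs)).all (fun _c => true) = true := by simp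
        rw [hL, hR]
      · have : ¬ (∀ y ∈ rs.map (fun row => row.length), y = r0.length) :=
          fun hc => h ((pv_ofList_singleton_iff _ _).mpr hc)
        obtain ⟨r, hr, hne⟩ : ∃ r ∈ rs, r.length ≠ r0.length := by
          by_contra hc; push Not at hc
          exact this (by simpa using fun r hr => hc r hr)
        simp only [if_pos h]
        simp
        exact ⟨r, by simp [hr], hne⟩
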